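-- pv_equiv track=rewrite | github.com/DPJones1/Homework | specialisation_assignment/2.1.py | unique_consanants
-- ===== SOURCE A (Python) =====
-- def unique_consanants(s):
--     consanants = "bcdfghjklmnpqrstvwxyz"
--
--     s = s.lower()
--
--     unique_consanants = set()
--
--     for character in s:
--         if character in consanants and s.count(character) == 1:
--             unique_consanants.add(character)
--
--     return len(unique_consanants)
-- ===== SOURCE B (Python) =====
-- def unique_consanants(s):
--     freq = {}
--     for ch in s.lower():
--         freq[ch] = freq.get(ch, 0) + 1
--     total = 0
--     for c in "bcdfghjklmnpqrstvwxyz":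
--         if freq.get(c, 0) == 1:
--             total += 1
--     return total
-- ===== Notes on version B (the rewrite author's own statement) =====
-- stated objective: faster
-- what changed: B builds a frequency dict of the lowercased string in one pass and then counts, over the fixed 21-letter consonant alphabet, the letters with frequency exactly 1, replacing A's per-character scan with s.count inside the loop and the dedup set.
import Mathlib
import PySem

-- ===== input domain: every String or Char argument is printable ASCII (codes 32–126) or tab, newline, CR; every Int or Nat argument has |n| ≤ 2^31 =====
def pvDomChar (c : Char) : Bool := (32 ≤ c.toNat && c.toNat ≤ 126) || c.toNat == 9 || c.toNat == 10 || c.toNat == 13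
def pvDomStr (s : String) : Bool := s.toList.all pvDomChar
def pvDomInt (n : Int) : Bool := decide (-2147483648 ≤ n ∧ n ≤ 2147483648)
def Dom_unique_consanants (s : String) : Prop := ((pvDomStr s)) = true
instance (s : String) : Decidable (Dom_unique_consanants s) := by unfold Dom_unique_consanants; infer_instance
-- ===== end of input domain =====

-- B replaces A's quadratic per-character `s.count` scan plus dedup set by one frequency
-- dict pass and a count over the fixed consonant alphabet (objective: faster).

-- ===== PORT A =====
-- `character in consanants` (char in string) is list membership; `s.count(character)` is
-- PySem.List.count on the char list — both exact for single characters.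
def unique_consanants (s : String) : Int :=
  let consanants : List Char := "bcdfghjklmnpqrstvwxyz".toList
  let t : List Char := PySem.Chars.lower s.toList
  let u : PySem.Set Char :=
    t.foldl (fun u c =>
      if consanants.contains c && (PySem.List.count t c == 1) then PySem.Set.add u c else u)
      PySem.Set.empty
  (PySem.Set.len u : Int)

-- ===== PORT B =====
def unique_consanants_alt (s : String) : Int :=
  let t : List Char := PySem.Chars.lower s.toList
  let freq : PySem.Dict Char Int :=
    t.foldl (fun d ch => d.insert ch (d.getD ch 0 + 1)) PySem.Dict.empty
  "bcdfghjklmnpqrstvwxyz".toList.foldl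
    (fun total c => if freq.getD c 0 == 1 then total + 1 else total) 0

-- ===== PRECONDITION & SPEC =====
def Spec_unique_consanants (s : String) (out : Int) : Prop := out = unique_consanants_alt s
instance (s : String) (out : Int) : Decidable (Spec_unique_consanants s out) := by unfold Spec_unique_consanants; infer_instance

-- ===== CLAIM (what is proved, stated in full; the proofs are below) =====
def Claim_equal_unique_consanants : Prop := ∀ (s : String), Dom_unique_consanants s → Spec_unique_consanants s (unique_consanants s)

-- ===== LEMMAS AND PROOFS =====

-- A's conditional-add loop builds the set of the filtered list.
theorem foldl_add_if_eq_filter (P : Char → Bool) :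
    ∀ (l : List Char) (s0 : PySem.Set Char),
      l.foldl (fun u c => if P c then PySem.Set.add u c else u) s0
        = (l.filter P).foldl PySem.Set.add s0 := by
  intro l
  induction l with
  | nil => intro s0; rfl
  | cons c l ih =>
    intro s0
    by_cases h : P c = true <;> simp [List.filter, h, ih]

theorem count_one_mem {t : List Char} {c : Char} (h : t.count c = 1) : c ∈ t := by
  have : 0 < t.count c := by omega
  exact List.count_pos_iff.mp this

theorem unique_consanants_spec' (s : String) :
    unique_consanants s = unique_consanants_alt s := by
  unfold unique_consanants unique_consanants_alt
  simp only [PySem.Dict.foldl_insert_getD_add_one_eq_counter, PySem.List.foldl_if_add_one,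
    foldl_add_if_eq_filter, PySem.Dict.getD_counter]
  set t : List Char := PySem.Chars.lower s.toList with ht
  set cons : List Char := "bcdfghjklmnpqrstvwxyz".toList with hcons
  have hperm :
      (PySem.Set.ofList (t.filter (fun c => cons.contains c && (PySem.List.count t c == 1)))).Perm
        (cons.filter (fun c => ((List.count c t : Int) == 1))) := by
    rw [List.perm_ext_iff_of_nodup (PySem.Set.nodup_ofList _)
      (List.Nodup.filter _ (by rw [hcons]; decide))]
    intro c
    simp only [PySem.Set.mem_ofList, List.mem_filter, Bool.and_eq_true, beq_iff_eq,
      List.contains_iff_mem, PySem.List.count_eq]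
    constructor
    · rintro ⟨_, hc, hcnt⟩
      refine ⟨hc, ?_⟩
      exact_mod_cast hcnt
    · rintro ⟨hc, hcnt⟩
      have hcnt' : t.count c = 1 := by exact_mod_cast hcnt
      exact ⟨count_one_mem hcnt', hc, hcnt'⟩
  have hlen : (List.foldl PySem.Set.add PySem.Set.empty
      (t.filter (fun c => cons.contains c && PySem.List.count t c == 1))).length
      = (cons.filter (fun c => ((List.count c t : Int) == 1))).length := by
    simpa [PySem.Set.ofList_eq_foldl] using hperm.length_eq
  simp only [PySem.Set.len, List.countP_eq_length_filter]
  omega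

-- ===== VERDICT (by name: the statement is the Claim_ definition above) =====
theorem unique_consanants_spec : Claim_equal_unique_consanants := by
  intro s _
  exact unique_consanants_spec' s
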